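-- pv_equiv track=rewrite | github.com/naha7777/A_Maze_Ing | sources/draw_path.py | calcul_path_coordinates
-- ===== SOURCE A (Python) =====
-- def calcul_path_coordinates(input: tuple[int, int],
--                             path: str) -> list[tuple[int, int]]:
--     """Compute the cell coordinates visited along the solution path."""
--     path_coordinates = []
--
--     for c in path:
--         if c not in "NSEW":
--             continue
--         x1, y1 = input
--
--         if c == "S":
--             input = (x1, y1+1)
--         elif c == "E":
--             input = (x1+1, y1)
--         elif c == "N":
--             input = (x1, y1-1)
--         elif c == "W":
--             input = (x1-1, y1)
--
--         path_coordinates.append(input)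
--     return path_coordinates
-- ===== SOURCE B (Python) =====
-- from itertools import accumulate
--
-- def calcul_path_coordinates(input: tuple[int, int],
--                             path: str) -> list[tuple[int, int]]:
--     """Compute the cell coordinates visited along the solution path.
--
--     Axis decomposition: each coordinate is computed independently as a
--     prefix sum of per-axis unit steps, then the two streams are zipped.
--     """
--     moves = [c for c in path if c in "NSEW"]
--     x0, y0 = input
--     xs = accumulate(((c == "E") - (c == "W") for c in moves), initial=x0)
--     ys = accumulate(((c == "S") - (c == "N") for c in moves), initial=y0)
--     next(xs)
--     next(ys)
--     return list(zip(xs, ys))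
-- ===== Notes on version B (the rewrite author's own statement) =====
-- stated objective: alternative
-- what changed: Replaces A's single loop that mutates a pair state with an axis decomposition: the x and y coordinates are computed independently as prefix sums of per-axis unit steps over the filtered moves, then zipped into positions.
import Mathlib
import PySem

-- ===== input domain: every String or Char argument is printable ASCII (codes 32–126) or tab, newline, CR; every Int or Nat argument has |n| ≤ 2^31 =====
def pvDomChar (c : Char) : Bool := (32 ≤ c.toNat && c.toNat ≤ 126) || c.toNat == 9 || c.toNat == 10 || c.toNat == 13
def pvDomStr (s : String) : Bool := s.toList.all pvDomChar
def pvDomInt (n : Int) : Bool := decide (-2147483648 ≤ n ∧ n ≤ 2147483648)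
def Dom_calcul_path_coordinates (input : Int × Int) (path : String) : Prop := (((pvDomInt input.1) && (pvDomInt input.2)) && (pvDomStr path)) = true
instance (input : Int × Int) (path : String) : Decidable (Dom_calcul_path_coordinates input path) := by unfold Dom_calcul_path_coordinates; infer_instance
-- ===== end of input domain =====

-- B replaces A's single pair-state loop with per-axis prefix sums (x and y computed independently, then zipped); alternative decomposition, same cost.


-- ===== PORT A =====
def pvLoopA : List Char → (Int × Int) → List (Int × Int) → List (Int × Int)
  | [], _, acc => acc
  | c :: cs, input, acc =>
    if ¬ ("NSEW".toList.contains c) then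
      pvLoopA cs input acc
    else
      let x1 := input.1
      let y1 := input.2
      let input' :=
        if c = 'S' then (x1, y1 + 1)
        else if c = 'E' then (x1 + 1, y1)
        else if c = 'N' then (x1, y1 - 1)
        else if c = 'W' then (x1 - 1, y1)
        else input
      pvLoopA cs input' (acc ++ [input'])

def calcul_path_coordinates (input : Int × Int) (path : String) : List (Int × Int) :=
  pvLoopA path.toList input []

-- ===== PORT B =====
-- per-axis unit step of a move character: (c == "E") - (c == "W"), (c == "S") - (c == "N")
def pvDx (c : Char) : Int := (if c = 'E' then 1 else 0) - (if c = 'W' then 1 else 0)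
def pvDy (c : Char) : Int := (if c = 'S' then 1 else 0) - (if c = 'N' then 1 else 0)

def calcul_path_coordinates_alt (input : Int × Int) (path : String) : List (Int × Int) :=
  let moves := path.toList.filter (fun c => "NSEW".toList.contains c)
  let xs := (List.scanl (· + ·) input.1 (moves.map pvDx)).tail
  let ys := (List.scanl (· + ·) input.2 (moves.map pvDy)).tail
  xs.zip ys

-- ===== PRECONDITION & SPEC =====
def Spec_calcul_path_coordinates (input : Int × Int) (path : String) (out : List (Int × Int)) : Prop := out = calcul_path_coordinates_alt input path
instance (input : Int × Int) (path : String) (out : List (Int × Int)) : Decidable (Spec_calcul_path_coordinates input path out) := by unfold Spec_calcul_path_coordinates; infer_instance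

-- ===== CLAIM (what is proved, stated in full; the proofs are below) =====
def Claim_equal_calcul_path_coordinates : Prop := ∀ (input : Int × Int) (path : String), Dom_calcul_path_coordinates input path → Spec_calcul_path_coordinates input path (calcul_path_coordinates input path)

-- ===== LEMMAS AND PROOFS =====
lemma pvScanl_head (b : Int) (l : List Int) :
    List.scanl (· + ·) b l = b :: (List.scanl (· + ·) b l).tail := by
  cases l <;> simp


lemma pvLoopA_axes : ∀ (cs : List Char) (x y : Int) (acc : List (Int × Int)),
    pvLoopA cs (x, y) acc
      = acc ++
        (((List.scanl (· + ·) x ((cs.filter (fun c => "NSEW".toList.contains c)).map pvDx)).tail).zip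
          ((List.scanl (· + ·) y ((cs.filter (fun c => "NSEW".toList.contains c)).map pvDy)).tail))
  | [], x, y, acc => by simp [pvLoopA]
  | c :: cs, x, y, acc => by
    have hlist : "NSEW".toList = ['N', 'S', 'E', 'W'] := rfl
    by_cases hN : c = 'N'
    · subst hN
      rw [pvLoopA]
      simp only [hlist]
      norm_num [List.filter_cons]
      rw [pvScanl_head (x + pvDx 'N'), pvScanl_head (y + pvDy 'N')]
      simp [pvDx, pvDy, pvLoopA_axes, sub_eq_add_neg]
    · by_cases hS : c = 'S'
      · subst hS
        rw [pvLoopA]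
        simp only [hlist]
        norm_num [List.filter_cons]
        rw [pvScanl_head (x + pvDx 'S'), pvScanl_head (y + pvDy 'S')]
        simp [pvDx, pvDy, pvLoopA_axes]
      · by_cases hE : c = 'E'
        · subst hE
          rw [pvLoopA]
          simp only [hlist]
          norm_num [List.filter_cons]
          rw [pvScanl_head (x + pvDx 'E'), pvScanl_head (y + pvDy 'E')]
          simp [pvDx, pvDy, pvLoopA_axes]
        · by_cases hW : c = 'W'
          · subst hW
            rw [pvLoopA]
            simp only [hlist]
            norm_num [List.filter_cons]
            rw [pvScanl_head (x + pvDx 'W'), pvScanl_head (y + pvDy 'W')]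
            simp [pvDx, pvDy, pvLoopA_axes, sub_eq_add_neg]
          · rw [pvLoopA, pvLoopA_axes]
            simp [hlist, hN, hS, hE, hW]

-- ===== VERDICT (by name: the statement is the Claim_ definition above) =====
theorem calcul_path_coordinates_spec : Claim_equal_calcul_path_coordinates := by
  intro input path _
  unfold Spec_calcul_path_coordinates calcul_path_coordinates calcul_path_coordinates_alt
  obtain ⟨x, y⟩ := input
  simpa using pvLoopA_axes path.toList x y []
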